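-- pv_equiv track=rewrite | github.com/mrtnnikiforov/SoftUni-Exercises | Advanced/2. Tuples and Sets/5. softuni_party.py | separate_guests
-- ===== SOURCE A (Python) =====
-- def is_vip_guest(guest):
--     return guest[0].isdigit()
--
-- def separate_guests(guests):
--     vip_guests = []
--     regular_guests = []
--     for guest in guests:
--         if is_vip_guest(guest):
--             vip_guests.append(guest)
--         else:
--             regular_guests.append(guest)
--     return (sorted(vip_guests), sorted(regular_guests))
-- ===== SOURCE B (Python) =====
-- def separate_guests(guests):
--     vip = []
--     regular = []
--     for guest in guests:
--         bucket = vip if guest[0].isdigit() else regular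
--         i = 0
--         while i < len(bucket) and bucket[i] < guest:
--             i += 1
--         bucket.insert(i, guest)
--     return (vip, regular)
-- ===== Notes on version B (the rewrite author's own statement) =====
-- stated objective: alternative
-- what changed: B never calls sorted(): it is an online insertion sort that keeps both buckets sorted at all times, inserting each guest at its position (found by a linear scan) in a single pass, instead of A's partition-into-two-lists followed by two library sorts.
-- outside the precondition, e.g. on separate_guests(['a', '']): A raises IndexError, B raises IndexError
import Mathlib
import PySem

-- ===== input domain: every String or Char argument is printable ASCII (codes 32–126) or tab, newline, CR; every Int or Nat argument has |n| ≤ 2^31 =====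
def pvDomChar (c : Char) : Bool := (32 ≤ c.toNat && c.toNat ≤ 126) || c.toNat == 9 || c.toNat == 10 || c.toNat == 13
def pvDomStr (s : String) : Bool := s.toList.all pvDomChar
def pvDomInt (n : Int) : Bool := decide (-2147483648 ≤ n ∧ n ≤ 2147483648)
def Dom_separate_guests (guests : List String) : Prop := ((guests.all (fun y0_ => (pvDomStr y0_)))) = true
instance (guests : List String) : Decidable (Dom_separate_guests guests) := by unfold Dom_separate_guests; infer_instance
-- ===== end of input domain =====

-- B replaces partition-then-two-library-sorts by a single-pass online insertion sort that keeps both buckets sorted while scanning; objective: alternative (same results, different algorithm).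


-- ===== PORT A =====
-- guest[0].isdigit(); the 'none' branch is Python's IndexError on an empty guest, excluded by Pre_.
def is_vip_guest (guest : String) : Bool :=
  match PySem.Str.pyGet? guest 0 with
  | some c => PySem.Chars.isdigit c
  | none => false

def separate_guests (guests : List String) : List String × List String :=
  let acc := guests.foldl
    (fun (acc : List String × List String) guest =>
      if is_vip_guest guest then (acc.1 ++ [guest], acc.2) else (acc.1, acc.2 ++ [guest]))
    ([], [])
  (PySem.List.sorted acc.1 (fun x => x) false, PySem.List.sorted acc.2 (fun x => x) false)

-- ===== PORT B =====
-- B's 'while i < len(bucket) and bucket[i] < guest: i += 1' position scan.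
def insPos (guest : String) : List String → Nat
  | [] => 0
  | x :: xs => if x < guest then insPos guest xs + 1 else 0

-- B's 'bucket.insert(i, guest)' at the scanned position.
def bucketInsert (bucket : List String) (guest : String) : List String :=
  PySem.List.insert bucket (insPos guest bucket : Int) guest

def separate_guests_alt (guests : List String) : List String × List String :=
  guests.foldl
    (fun (acc : List String × List String) guest =>
      if is_vip_guest guest then (bucketInsert acc.1 guest, acc.2)
      else (acc.1, bucketInsert acc.2 guest))
    ([], [])

-- ===== PRECONDITION & SPEC =====
-- Pre_ excludes lists containing an empty-string guest: there guest[0] raises IndexError in A (and in B).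
def Pre_separate_guests (guests : List String) : Prop := ∀ g ∈ guests, g.toList ≠ []
instance (guests : List String) : Decidable (Pre_separate_guests guests) := by unfold Pre_separate_guests; infer_instance
def pvWitness_separate_guests : List String := ["anna", "7up", "Bob"]

def Spec_separate_guests (guests : List String) (out : List String × List String) : Prop := out = separate_guests_alt guests
instance (guests : List String) (out : List String × List String) : Decidable (Spec_separate_guests guests out) := by unfold Spec_separate_guests; infer_instance

-- ===== CLAIM (what is proved, stated in full; the proofs are below) =====
def Claim_equal_separate_guests : Prop := ∀ (guests : List String), Dom_separate_guests guests → Pre_separate_guests guests → Spec_separate_guests guests (separate_guests guests)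

-- ===== LEMMAS AND PROOFS =====

-- position scan never passes the end of the bucket
theorem insPos_le (g : String) (b : List String) : insPos g b ≤ b.length := by
  induction b with
  | nil => simp [insPos]
  | cons x xs ih => by_cases h : x < g <;> simp [insPos, h] <;> omega

-- index-based insert rewritten as the obvious structural recursion
theorem bucketInsert_eq (g : String) (b : List String) :
    bucketInsert b g = match b with
      | [] => [g]
      | x :: xs => if x < g then x :: bucketInsert xs g else g :: x :: xs := by
  match b with
  | [] => rfl
  | x :: xs =>
    by_cases h : x < g
    · simp only [bucketInsert, insPos, h, if_pos]
      rw [PySem.List.insert_natCast (x :: xs) (insPos g xs + 1) g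
            (by have := insPos_le g xs; simp [List.length_cons]; omega),
          PySem.List.insert_natCast xs (insPos g xs) g (insPos_le g xs)]
      simp [List.take_succ_cons, List.drop_succ_cons]
    · simp [bucketInsert, insPos, h, PySem.List.insert_zero]

theorem bucketInsert_perm (g : String) (b : List String) : (bucketInsert b g).Perm (g :: b) := by
  induction b with
  | nil => rw [bucketInsert_eq]
  | cons x xs ih =>
    rw [bucketInsert_eq]
    by_cases h : x < g
    · simp only [h, if_pos]
      exact (ih.cons x).trans (List.Perm.swap g x xs)
    · simp [h]

theorem mem_bucketInsert {y g : String} {b : List String} (hy : y ∈ bucketInsert b g) :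
    y = g ∨ y ∈ b := by
  have := (bucketInsert_perm g b).mem_iff.mp hy
  simpa using this

theorem bucketInsert_pairwise (g : String) (b : List String)
    (hb : b.Pairwise (· ≤ ·)) : (bucketInsert b g).Pairwise (· ≤ ·) := by
  induction b with
  | nil => rw [bucketInsert_eq]; simp
  | cons x xs ih =>
    rw [bucketInsert_eq]
    rcases List.pairwise_cons.mp hb with ⟨hx, hxs⟩
    by_cases h : x < g
    · simp only [h, if_pos]
      refine List.pairwise_cons.mpr ⟨?_, ih hxs⟩
      intro y hy
      rcases mem_bucketInsert hy with rfl | hy'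
      · exact le_of_lt h
      · exact hx y hy'
    · simp only [h, if_neg]
      refine List.pairwise_cons.mpr ⟨?_, hb⟩
      intro y hy
      rcases List.mem_cons.mp hy with rfl | hy'
      · exact le_of_not_gt h
      · exact le_trans (le_of_not_gt h) (hx y hy')

-- A's two-accumulator loop computes the two filters of the input list.
theorem foldl_partition (p : String → Bool) (gs : List String) (a b : List String) :
    gs.foldl (fun (acc : List String × List String) g =>
      if p g then (acc.1 ++ [g], acc.2) else (acc.1, acc.2 ++ [g])) (a, b)
    = (a ++ gs.filter p, b ++ gs.filter (fun g => !p g)) := by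
  induction gs generalizing a b with
  | nil => simp
  | cons g gs ih =>
    by_cases h : p g <;> simp [List.foldl, h, ih]

-- B's loop invariant: each bucket is a sorted rearrangement of the corresponding filter.
theorem fold_ins_spec (p : String → Bool) (gs : List String) :
    ∀ (v r : List String),
    (gs.foldl (fun (acc : List String × List String) g =>
        if p g then (bucketInsert acc.1 g, acc.2) else (acc.1, bucketInsert acc.2 g)) (v, r)).1.Perm
      (v ++ gs.filter p)
    ∧ (gs.foldl (fun (acc : List String × List String) g =>
        if p g then (bucketInsert acc.1 g, acc.2) else (acc.1, bucketInsert acc.2 g)) (v, r)).2.Perm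
      (r ++ gs.filter (fun g => !p g))
    ∧ (v.Pairwise (· ≤ ·) →
        (gs.foldl (fun (acc : List String × List String) g =>
          if p g then (bucketInsert acc.1 g, acc.2) else (acc.1, bucketInsert acc.2 g)) (v, r)).1.Pairwise (· ≤ ·))
    ∧ (r.Pairwise (· ≤ ·) →
        (gs.foldl (fun (acc : List String × List String) g =>
          if p g then (bucketInsert acc.1 g, acc.2) else (acc.1, bucketInsert acc.2 g)) (v, r)).2.Pairwise (· ≤ ·)) := by
  induction gs with
  | nil => intro v r; simp
  | cons g gs ih =>
    intro v r
    by_cases h : p g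
    · have step : ∀ (s : List String × List String),
          List.foldl (fun (acc : List String × List String) g =>
            if p g then (bucketInsert acc.1 g, acc.2) else (acc.1, bucketInsert acc.2 g)) s (g :: gs)
          = List.foldl (fun (acc : List String × List String) g =>
            if p g then (bucketInsert acc.1 g, acc.2) else (acc.1, bucketInsert acc.2 g))
            (bucketInsert s.1 g, s.2) gs := by
        intro s; simp [List.foldl_cons, h]
      rw [step (v, r)]
      obtain ⟨h1, h2, h3, h4⟩ := ih (bucketInsert v g) r
      refine ⟨?_, ?_, fun hv => h3 (bucketInsert_pairwise g v hv), h4⟩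
      · have e : List.filter p (g :: gs) = g :: List.filter p gs := by simp [h]
        rw [e]
        exact h1.trans (((bucketInsert_perm g v).append_right _).trans List.perm_middle.symm)
      · have e : List.filter (fun g => !p g) (g :: gs) = List.filter (fun g => !p g) gs := by
          simp [h]
        rw [e]; exact h2
    · have step : ∀ (s : List String × List String),
          List.foldl (fun (acc : List String × List String) g =>
            if p g then (bucketInsert acc.1 g, acc.2) else (acc.1, bucketInsert acc.2 g)) s (g :: gs)
          = List.foldl (fun (acc : List String × List String) g =>
            if p g then (bucketInsert acc.1 g, acc.2) else (acc.1, bucketInsert acc.2 g))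
            (s.1, bucketInsert s.2 g) gs := by
        intro s; simp [List.foldl_cons, h]
      rw [step (v, r)]
      obtain ⟨h1, h2, h3, h4⟩ := ih v (bucketInsert r g)
      refine ⟨?_, ?_, h3, fun hr => h4 (bucketInsert_pairwise g r hr)⟩
      · have e : List.filter p (g :: gs) = List.filter p gs := by simp [h]
        rw [e]; exact h1
      · have e : List.filter (fun g => !p g) (g :: gs) = g :: List.filter (fun g => !p g) gs := by
          simp [h]
        rw [e]
        exact h2.trans (((bucketInsert_perm g r).append_right _).trans List.perm_middle.symm)

-- ===== VERDICT (by name: the statement is the Claim_ definition above) =====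
theorem separate_guests_spec : Claim_equal_separate_guests := by
  intro guests _ _
  unfold Spec_separate_guests separate_guests separate_guests_alt
  rw [foldl_partition]
  obtain ⟨h1, h2, h3, h4⟩ := fold_ins_spec is_vip_guest guests [] []
  simp only [List.nil_append] at h1 h2
  exact Prod.ext
    (PySem.List.sorted_id_eq_of_perm_of_pairwise _ _ h1 (h3 List.Pairwise.nil))
    (PySem.List.sorted_id_eq_of_perm_of_pairwise _ _ h2 (h4 List.Pairwise.nil))
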